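-- pv_equiv track=rewrite | github.com/vigneshsabapathi/python-algorithms | dynamic_programming/all_construct_optimized.py | memoized
-- ===== SOURCE A (Python) =====
-- def memoized(target: str, word_bank: list[str] | None = None) -> list[list[str]]:
--     """
--     >>> sorted([sorted(x) for x in memoized("purple", ["purp", "p", "ur", "le", "purpl"])])
--     [['le', 'purp'], ['le', 'p', 'p', 'ur']]
--     """
--     word_bank = word_bank or []
--     memo: dict[str, list[list[str]]] = {}
--
--     def solve(remaining: str) -> list[list[str]]:
--         if remaining in memo:
--             return memo[remaining]
--         if remaining == "":
--             return [[]]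
--
--         results: list[list[str]] = []
--         for word in word_bank:
--             if remaining.startswith(word):
--                 suffix_ways = solve(remaining[len(word):])
--                 for way in suffix_ways:
--                     results.append([word, *way])
--
--         memo[remaining] = results
--         return results
--
--     return solve(target)
-- ===== SOURCE B (Python) =====
-- def memoized(target: str, word_bank: list[str] | None = None) -> list[list[str]]:
--     word_bank = word_bank or []
--     n = len(target)
--     table: list = [None] * n + [[[]]]
--     for i in range(n - 1, -1, -1):
--         ways = []
--         for word in word_bank:
--             if target.startswith(word, i):
--                 ways.extend([word, *way] for way in table[i + len(word)])
--         table[i] = ways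
--     return table[0]
-- ===== Notes on version B (the rewrite author's own statement) =====
-- stated objective: alternative
-- what changed: Replaced the top-down memoized recursion with a dict of suffix strings by bottom-up tabulation: a table indexed by start position filled from the end of the target, using startswith with an offset so no suffix strings are built or hashed.
-- outside the precondition, e.g. on memoized('a', ['a', '']): A raises RecursionError, B raises TypeError
import Mathlib
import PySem

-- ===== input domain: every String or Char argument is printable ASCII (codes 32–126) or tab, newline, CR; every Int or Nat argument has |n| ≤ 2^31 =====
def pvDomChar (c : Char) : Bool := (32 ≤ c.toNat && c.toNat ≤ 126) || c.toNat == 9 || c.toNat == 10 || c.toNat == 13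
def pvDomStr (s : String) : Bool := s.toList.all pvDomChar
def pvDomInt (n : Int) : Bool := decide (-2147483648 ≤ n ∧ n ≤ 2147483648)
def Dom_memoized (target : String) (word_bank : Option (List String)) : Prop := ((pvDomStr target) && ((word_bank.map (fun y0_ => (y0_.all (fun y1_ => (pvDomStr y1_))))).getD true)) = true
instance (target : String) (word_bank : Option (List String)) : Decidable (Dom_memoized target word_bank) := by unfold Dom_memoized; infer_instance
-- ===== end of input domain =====

-- B replaces A's memoized top-down recursion by bottom-up tabulation over suffix start
-- positions (objective: alternative decomposition, same asymptotic cost).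


-- ===== PORT A =====
-- A's inner 'solve' with the memo dict threaded through (keys are the remaining suffix,
-- as List Char, in bijection with the Python string key); the fuel argument only makes
-- the recursion structural — under Pre_ it is never exhausted.
def solveA (bank : List String) : Nat → List Char → PySem.Dict (List Char) (List (List String)) →
    (List (List String) × PySem.Dict (List Char) (List (List String)))
  | 0, _, memo => ([], memo)
  | fuel + 1, remaining, memo =>
    match memo.get? remaining with
    | some v => (v, memo)
    | none =>
      if remaining = [] then ([[]], memo)
      else
        let p := bank.foldl
          (fun (acc : List (List String) × PySem.Dict (List Char) (List (List String))) word =>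
            if PySem.Chars.startswith remaining word.toList then
              let r := solveA bank fuel (remaining.drop word.toList.length) acc.2
              (acc.1 ++ r.1.map (fun way => word :: way), r.2)
            else acc)
          ([], memo)
        (p.1, p.2.insert remaining p.1)

def memoized (target : String) (word_bank : Option (List String)) : List (List String) :=
  let wb := match word_bank with | none => [] | some l => l   -- word_bank = word_bank or []
  (solveA wb (target.toList.length + 1) target.toList PySem.Dict.empty).1

-- ===== PORT B =====
-- B's table, built back-to-front: altTab bank rem is table[i..n] for rem = target[i:],
-- head = table[i]; target.startswith(word, i) is startswith of the suffix rem.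
def altTab (bank : List String) : List Char → List (List (List String))
  | [] => [[[]]]
  | c :: rest =>
    let tbl := altTab bank rest
    let ways := bank.foldl
      (fun ways word =>
        if PySem.Chars.startswith (c :: rest) word.toList then
          ways ++ (tbl.getD (word.toList.length - 1) []).map (fun way => word :: way)
        else ways)
      []
    ways :: tbl

def memoized_alt (target : String) (word_bank : Option (List String)) : List (List String) :=
  let wb := match word_bank with | none => [] | some l => l   -- word_bank = word_bank or []
  (altTab wb target.toList).headD []

-- ===== PRECONDITION & SPEC =====
-- Pre_ excludes only the inputs on which A raises: a nonempty target with "" in the word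
-- bank makes A's solve recurse on the unchanged suffix forever (RecursionError); B raises
-- (TypeError) there too, so nothing is claimed on those inputs.
def Pre_memoized (target : String) (word_bank : Option (List String)) : Prop :=
  target = "" ∨ "" ∉ (word_bank.getD [])
instance (target : String) (word_bank : Option (List String)) : Decidable (Pre_memoized target word_bank) := by unfold Pre_memoized; infer_instance

def pvWitness_memoized : String × Option (List String) := ("purple", some ["purp", "p", "ur", "le", "purpl"])

def Spec_memoized (target : String) (word_bank : Option (List String)) (out : List (List String)) : Prop := out = memoized_alt target word_bank
instance (target : String) (word_bank : Option (List String)) (out : List (List String)) : Decidable (Spec_memoized target word_bank out) := by unfold Spec_memoized; infer_instance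

-- ===== CLAIM (what is proved, stated in full; the proofs are below) =====
def Claim_equal_memoized : Prop := ∀ (target : String) (word_bank : Option (List String)), Dom_memoized target word_bank → Pre_memoized target word_bank → Spec_memoized target word_bank (memoized target word_bank)

-- ===== LEMMAS AND PROOFS =====

-- table[i] of B as a function of the suffix target[i:]
def gB (bank : List String) (rem : List Char) : List (List String) :=
  (altTab bank rem).headD []

-- the invariant of A's memo dict: every stored entry is the tabulated value
def GoodMemo (bank : List String) (memo : PySem.Dict (List Char) (List (List String))) : Prop :=
  ∀ s v, memo.get? s = some v → v = gB bank s

lemma altTab_getD (bank : List String) :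
    ∀ (rem : List Char) (j : Nat), j ≤ rem.length →
      (altTab bank rem).getD j [] = gB bank (rem.drop j) := by
  intro rem
  induction rem with
  | nil =>
    intro j hj
    have : j = 0 := Nat.le_zero.mp hj
    subst this; rfl
  | cons c rest ih =>
    intro j hj
    cases j with
    | zero => rfl
    | succ k =>
      simp only [altTab, List.getD, List.drop]
      exact ih k (by simpa using hj)

lemma startswith_length {s p : List Char} (h : PySem.Chars.startswith s p = true) :
    p.length ≤ s.length :=
  ((PySem.Chars.startswith_iff s p).mp h).length_le

-- the recurrence B's table entries satisfy, once no bank word is empty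
lemma gB_cons (bank : List String) (hb : "" ∉ bank) (c : Char) (rest : List Char) :
    gB bank (c :: rest) =
      bank.foldl
        (fun ways word =>
          if PySem.Chars.startswith (c :: rest) word.toList then
            ways ++ (gB bank ((c :: rest).drop word.toList.length)).map (fun way => word :: way)
          else ways)
        [] := by
  unfold gB
  rw [altTab]
  simp only [List.headD_cons]
  apply PySem.List.foldl_congr_mem'
  intro word hmem ways
  by_cases hsw : PySem.Chars.startswith (c :: rest) word.toList = true
  · have hwne : word ≠ "" := fun e => hb (e ▸ hmem)
    have hne : word.toList ≠ [] := by simpa using hwne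
    have hpos : word.toList.length ≠ 0 := fun h0 => hne (List.eq_nil_of_length_eq_zero h0)
    have hlen : word.toList.length - 1 ≤ rest.length := by
      have := startswith_length hsw
      simp only [List.length_cons] at this
      omega
    have h1 := altTab_getD bank rest (word.toList.length - 1) hlen
    have h2 : (c :: rest).drop word.toList.length = rest.drop (word.toList.length - 1) := by
      obtain ⟨d, ds, hd⟩ := List.exists_cons_of_ne_nil hne
      rw [hd]
      simp
    simp only [if_pos hsw, h1, h2]
    rfl
  · simp only [if_neg hsw]

-- A's inner for-loop over the word bank, threading (results, memo)
lemma foldl_aux (bank : List String) (f : Nat) (rem : List Char)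
    (H : ∀ memo, GoodMemo bank memo → ∀ word, word ∈ bank →
        PySem.Chars.startswith rem word.toList = true →
        (solveA bank f (rem.drop word.toList.length) memo).1 = gB bank (rem.drop word.toList.length) ∧
          GoodMemo bank (solveA bank f (rem.drop word.toList.length) memo).2) :
    ∀ (ws : List String), (∀ w ∈ ws, w ∈ bank) →
      ∀ (acc : List (List String)) memo, GoodMemo bank memo →
      (ws.foldl
          (fun (acc : List (List String) × PySem.Dict (List Char) (List (List String))) word =>
            if PySem.Chars.startswith rem word.toList then
              let r := solveA bank f (rem.drop word.toList.length) acc.2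
              (acc.1 ++ r.1.map (fun way => word :: way), r.2)
            else acc)
          (acc, memo)).1
        = ws.foldl
            (fun ways word =>
              if PySem.Chars.startswith rem word.toList then
                ways ++ (gB bank (rem.drop word.toList.length)).map (fun way => word :: way)
              else ways)
            acc ∧
      GoodMemo bank
        (ws.foldl
          (fun (acc : List (List String) × PySem.Dict (List Char) (List (List String))) word =>
            if PySem.Chars.startswith rem word.toList then
              let r := solveA bank f (rem.drop word.toList.length) acc.2
              (acc.1 ++ r.1.map (fun way => word :: way), r.2)
            else acc)
          (acc, memo)).2 := by
  intro ws
  induction ws with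
  | nil => intro _ acc memo hmemo; exact ⟨rfl, hmemo⟩
  | cons w ws ih =>
    intro hws acc memo hmemo
    simp only [List.foldl_cons]
    by_cases hsw : PySem.Chars.startswith rem w.toList = true
    · obtain ⟨h1, h2⟩ := H memo hmemo w (hws w List.mem_cons_self) hsw
      simp only [if_pos hsw, h1]
      exact ih (fun x hx => hws x (List.mem_cons_of_mem w hx)) _ _ h2
    · simp only [if_neg hsw]
      exact ih (fun x hx => hws x (List.mem_cons_of_mem w hx)) acc memo hmemo

lemma solveA_correct (bank : List String) (hb : "" ∉ bank) :
    ∀ (n : Nat) (rem : List Char), rem.length ≤ n →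
      ∀ (fuel : Nat), rem.length < fuel →
        ∀ memo, GoodMemo bank memo →
          (solveA bank fuel rem memo).1 = gB bank rem ∧
            GoodMemo bank (solveA bank fuel rem memo).2 := by
  intro n
  induction n with
  | zero =>
    intro rem hle fuel hf memo hmemo
    have hrem : rem = [] := List.eq_nil_of_length_eq_zero (Nat.le_zero.mp hle)
    subst hrem
    obtain ⟨f, rfl⟩ : ∃ f, fuel = f + 1 := ⟨fuel - 1, by omega⟩
    cases hg : memo.get? ([] : List Char) with
    | some v => simp only [solveA, hg]; exact ⟨hmemo _ _ hg, hmemo⟩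
    | none => simp only [solveA, hg]; exact ⟨rfl, hmemo⟩
  | succ n ih =>
    intro rem hle fuel hf memo hmemo
    obtain ⟨f, rfl⟩ : ∃ f, fuel = f + 1 := ⟨fuel - 1, by omega⟩
    cases hg : memo.get? rem with
    | some v => simp only [solveA, hg]; exact ⟨hmemo _ _ hg, hmemo⟩
    | none =>
      by_cases hr : rem = []
      · subst hr; simp only [solveA, hg]; exact ⟨rfl, hmemo⟩
      · obtain ⟨c, rest, rfl⟩ := List.exists_cons_of_ne_nil hr
        have H : ∀ memo', GoodMemo bank memo' → ∀ word, word ∈ bank →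
            PySem.Chars.startswith (c :: rest) word.toList = true →
            (solveA bank f ((c :: rest).drop word.toList.length) memo').1
              = gB bank ((c :: rest).drop word.toList.length) ∧
              GoodMemo bank (solveA bank f ((c :: rest).drop word.toList.length) memo').2 := by
          intro memo' hm word hwb hsw
          have hwne : word ≠ "" := fun e => hb (e ▸ hwb)
          have hne : word.toList ≠ [] := by simpa using hwne
          have hpos : word.toList.length ≠ 0 := fun h0 => hne (List.eq_nil_of_length_eq_zero h0)
          have hlen : ((c :: rest).drop word.toList.length).length ≤ n := by
            simp only [List.length_drop, List.length_cons]
            simp only [List.length_cons] at hle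
            omega
          have hfu : ((c :: rest).drop word.toList.length).length < f := by
            simp only [List.length_drop, List.length_cons]
            simp only [List.length_cons] at hf
            omega
          exact ih _ hlen f hfu memo' hm
        have haux := foldl_aux bank f (c :: rest) H bank (fun w hw => hw) [] memo hmemo
        simp only [solveA, hg, if_neg hr]
        refine ⟨haux.1.trans (gB_cons bank hb c rest).symm, ?_⟩
        intro s v hv
        rw [PySem.Dict.get?_insert] at hv
        by_cases hs : s = c :: rest
        · rw [if_pos hs] at hv
          subst hs
          cases hv
          exact haux.1.trans (gB_cons bank hb c rest).symm
        · rw [if_neg hs] at hv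
          exact haux.2 s v hv

lemma goodmemo_empty (bank : List String) : GoodMemo bank PySem.Dict.empty := by
  intro s v hv
  simp [PySem.Dict.get?_empty] at hv

lemma core (bank : List String) (t : List Char) (hb : "" ∉ bank) :
    (solveA bank (t.length + 1) t PySem.Dict.empty).1 = (altTab bank t).headD [] :=
  (solveA_correct bank hb t.length t le_rfl (t.length + 1) (by omega)
    PySem.Dict.empty (goodmemo_empty bank)).1

theorem memoized_eq (target : String) (word_bank : Option (List String))
    (hpre : Pre_memoized target word_bank) :
    memoized target word_bank = memoized_alt target word_bank := by
  rcases hpre with h | h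
  · subst h
    have ht : ("" : String).toList = [] := rfl
    cases word_bank with
    | none => rfl
    | some l => rfl
  · cases word_bank with
    | none =>
      simp only [memoized, memoized_alt]
      exact core [] target.toList (List.not_mem_nil)
    | some l =>
      simp only [Option.getD_some] at h
      simp only [memoized, memoized_alt]
      exact core l target.toList h

-- ===== VERDICT (by name: the statement is the Claim_ definition above) =====
theorem memoized_spec : Claim_equal_memoized := by
  intro target word_bank _ hpre
  exact memoized_eq target word_bank hpre
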